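-- pv_equiv track=rewrite | github.com/StevTheDev/Advent_of_Code_2018 | 2/day2.py | check
-- ===== SOURCE A (Python) =====
-- def check(string):
--     seen=[]
--     count=[]
--
--     for char in list(string):
--         if char not in seen:
--             seen.append(char)
--             count.append(1)
--         else:
--             count[seen.index(char)] += 1
--     two = three = 0
--     if 2 in count:
--         two = 1
--     if 3 in count:
--         three = 1
--
--     return (two,three)
-- ===== SOURCE B (Python) =====
-- def check(string):
--     chars = list(string)
--     counts = [chars.count(ch) for ch in dict.fromkeys(chars)]
--     return (int(2 in counts), int(3 in counts))
-- ===== Notes on version B (the rewrite author's own statement) =====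
-- stated objective: simpler
-- what changed: Replaces A's incrementally maintained parallel seen/count lists (with list.index lookups and in-place increments) by a direct comprehension counting each distinct character (dict.fromkeys dedup) over the whole string, then tests 2/3 membership.
import Mathlib
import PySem

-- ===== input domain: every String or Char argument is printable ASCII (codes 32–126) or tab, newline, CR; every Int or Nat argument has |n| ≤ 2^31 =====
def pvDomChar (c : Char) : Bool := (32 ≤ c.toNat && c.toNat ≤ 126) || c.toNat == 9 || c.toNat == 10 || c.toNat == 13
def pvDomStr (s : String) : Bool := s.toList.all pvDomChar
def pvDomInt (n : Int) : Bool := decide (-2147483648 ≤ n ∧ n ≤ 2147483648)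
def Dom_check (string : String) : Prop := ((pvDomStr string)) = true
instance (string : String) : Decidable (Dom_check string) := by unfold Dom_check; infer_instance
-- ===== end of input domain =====

-- B replaces A's incrementally maintained seen/count parallel lists by a direct
-- per-character count comprehension over the whole string (objective: simpler).

-- ===== PORT A =====
-- one iteration of A's for-loop: state is (seen, count)
def checkStep (st : List Char × List Int) (c : Char) : List Char × List Int :=
  if st.1.contains c = false then
    (st.1 ++ [c], st.2 ++ [1])
  else
    match PySem.List.index? st.1 c with
    | some i => (st.1, st.2.set i (st.2.getD i 0 + 1))   -- count[seen.index(char)] += 1 (index valid here)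
    | none => (st.1, st.2)                               -- unreachable: char ∈ seen

def check (string : String) : List Int :=
  let st := string.toList.foldl checkStep ([], [])
  let two : Int := if st.2.contains 2 then 1 else 0
  let three : Int := if st.2.contains 3 then 1 else 0
  [two, three]

-- ===== PORT B =====
def check_alt (string : String) : List Int :=
  let chars := string.toList
  let counts : List Int := (PySem.List.dedup chars).map (fun ch => (PySem.List.count chars ch : Int))
  [if counts.contains 2 then 1 else 0, if counts.contains 3 then 1 else 0]

-- ===== PRECONDITION & SPEC =====
def Spec_check (string : String) (out : List Int) : Prop := out = check_alt string
instance (string : String) (out : List Int) : Decidable (Spec_check string out) := by unfold Spec_check; infer_instance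

-- ===== CLAIM (what is proved, stated in full; the proofs are below) =====
def Claim_equal_check : Prop := ∀ (string : String), Dom_check string → Spec_check string (check string)

-- ===== LEMMAS AND PROOFS =====

-- setting position (index? seen c) of a map to its value + 1 = mapping with a pointwise bump at c
lemma set_index_map (f : Char → Int) (c : Char) :
    ∀ (seen : List Char) (i : Nat), seen.Nodup → PySem.List.index? seen c = some i →
      ((seen.map f).set i ((seen.map f).getD i 0 + 1))
        = seen.map (fun x => if x = c then f x + 1 else f x) := by
  intro seen
  induction seen with
  | nil => intro i _ h; rw [PySem.List.index?_eq_idxOf?] at h; simp at h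
  | cons a t ih =>
    intro i hnd hidx
    by_cases hac : a = c
    · subst hac
      rw [PySem.List.index?_cons_self] at hidx
      cases hidx
      simp only [List.map_cons, List.set_cons_zero, List.getD_cons_zero]
      rw [if_pos trivial]
      congr 1
      refine (List.map_congr_left ?_).symm
      intro x hx
      have : x ≠ a := fun h => (List.nodup_cons.mp hnd).1 (h ▸ hx)
      simp [this]
    · rw [PySem.List.index?_cons_of_ne t hac] at hidx
      rcases Option.map_eq_some_iff.mp hidx with ⟨j, hj, rfl⟩
      simp only [List.map_cons, List.set_cons_succ, List.getD_cons_succ, if_neg hac]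
      congr 1
      exact ih j (List.nodup_cons.mp hnd).2 hj

-- invariant of A's loop: seen stays nodup, covers exactly the processed prefix,
-- and count is the map of prefix-occurrence-counts over seen
lemma checkLoop_inv :
    ∀ (rest seen pfx : List Char), seen.Nodup → (∀ c, c ∈ seen ↔ c ∈ pfx) →
      ∃ seen',
        List.foldl checkStep (seen, seen.map (fun c => ((pfx.count c : Nat) : Int))) rest
          = (seen', seen'.map (fun c => (((pfx ++ rest).count c : Nat) : Int)))
        ∧ seen'.Nodup ∧ (∀ c, c ∈ seen' ↔ c ∈ pfx ++ rest) := by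
  intro rest
  induction rest with
  | nil =>
    intro seen pfx hnd hmem
    exact ⟨seen, by simp, hnd, by simpa using hmem⟩
  | cons c rest ih =>
    intro seen pfx hnd hmem
    rw [List.foldl_cons]
    by_cases hc : c ∈ seen
    · -- 'else' branch of A: bump count at seen.index c
      have hcont : seen.contains c = true := by simpa using hc
      obtain ⟨i, hi⟩ : ∃ i, PySem.List.index? seen c = some i := by
        rw [PySem.List.index?_eq_idxOf?]
        exact Option.isSome_iff_exists.mp (by simpa [List.isSome_idxOf?] using hc)
      have hstep : checkStep (seen, seen.map (fun x => ((pfx.count x : Nat) : Int))) c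
          = (seen, seen.map (fun x => (((pfx ++ [c]).count x : Nat) : Int))) := by
        simp only [checkStep, hcont, Bool.true_eq_false, if_false, hi]
        congr 1
        rw [set_index_map _ c seen i hnd hi]
        refine List.map_congr_left ?_
        intro x _
        by_cases hxc : x = c
        · simp [hxc, List.count_append]
        · simp [hxc, Ne.symm hxc, List.count_append]
      rw [hstep]
      obtain ⟨seen', heq, hnd', hmem'⟩ := ih seen (pfx ++ [c]) hnd
        (by intro x; rw [hmem x]; constructor
            · intro h; exact List.mem_append_left _ h
            · intro h; rcases List.mem_append.mp h with h | h
              · exact h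
              · simp at h; exact h ▸ (hmem c).mp hc)
      exact ⟨seen', by rw [heq]; simp, hnd', by intro x; rw [hmem' x]; simp⟩
    · -- 'then' branch of A: append char with count 1
      have hcont : seen.contains c = false := by simpa using hc
      have hcpfx : c ∉ pfx := fun h => hc ((hmem c).mpr h)
      have hstep : checkStep (seen, seen.map (fun x => ((pfx.count x : Nat) : Int))) c
          = (seen ++ [c], (seen ++ [c]).map (fun x => (((pfx ++ [c]).count x : Nat) : Int))) := by
        simp only [checkStep, hcont]
        rw [if_pos trivial, List.map_append]
        refine congrArg (Prod.mk (seen ++ [c])) ?_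
        congr 1
        · refine (List.map_congr_left ?_).symm
          intro x hx
          have hxc : x ≠ c := fun h => hc (h ▸ hx)
          simp [List.count_append, Ne.symm hxc]
        · simp [List.count_append, List.count_singleton, List.count_eq_zero_of_not_mem hcpfx]
      rw [hstep]
      obtain ⟨seen', heq, hnd', hmem'⟩ := ih (seen ++ [c]) (pfx ++ [c])
        (by simp [List.nodup_append, hnd]
            exact fun a ha h => hc (h ▸ ha))
        (by intro x; simp [hmem x])
      exact ⟨seen', by rw [heq]; simp, hnd', by intro x; rw [hmem' x]; simp⟩

-- final characterisation of A's count list: its members are exactly the whole-string counts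
lemma check_count_spec (l : List Char) :
    ∃ seen', List.foldl checkStep ([], []) l
        = (seen', seen'.map (fun c => ((l.count c : Nat) : Int)))
      ∧ (∀ c, c ∈ seen' ↔ c ∈ l) := by
  obtain ⟨seen', heq, _, hmem⟩ := checkLoop_inv l [] [] List.nodup_nil (by simp)
  exact ⟨seen', by simpa using heq, by simpa using hmem⟩

lemma mem_counts_iff (l : List Char) (seen' : List Char) (hmem : ∀ c, c ∈ seen' ↔ c ∈ l) (n : Int) :
    (seen'.map (fun c => ((l.count c : Nat) : Int))).contains n
      = ((PySem.List.dedup l).map (fun c => ((l.count c : Nat) : Int))).contains n := by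
  simp only [List.contains_eq_mem, List.mem_map, decide_eq_decide, PySem.List.mem_dedup]
  constructor
  · rintro ⟨c, hc, rfl⟩; exact ⟨c, (hmem c).mp hc, rfl⟩
  · rintro ⟨c, hc, rfl⟩; exact ⟨c, (hmem c).mpr hc, rfl⟩

-- ===== VERDICT (by name: the statement is the Claim_ definition above) =====
theorem check_spec : Claim_equal_check := by
  intro string _
  unfold Spec_check check check_alt
  obtain ⟨seen', heq, hmem⟩ := check_count_spec string.toList
  simp only [heq, PySem.List.count_eq]
  rw [mem_counts_iff string.toList seen' hmem 2, mem_counts_iff string.toList seen' hmem 3]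
  rfl
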